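-- pv_equiv track=rewrite | github.com/MSR-LIT/NLEdit | src/sqlutils/sqlutils.py | drop_join_conds
-- ===== SOURCE A (Python) =====
-- def drop_join_conds(sql_toks):
--     output_sql = []
--     skip = 0
--     for ti, tok in enumerate(sql_toks):
--         if skip > 0:
--             skip -= 1
--         elif tok == 'on':
--             if ti + 4 < len(sql_toks) and sql_toks[ti + 4] == 'and':
--                 skip = 7
--             else:
--                 skip = 3
--         else:
--             output_sql.append(tok)
--     return output_sql
-- ===== SOURCE B (Python) =====
-- def drop_join_conds(sql_toks):
--     n = len(sql_toks)
--     # stage 1: locate the half-open spans [start, end) of tokens to delete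
--     spans = []
--     i = 0
--     while i < n:
--         if sql_toks[i] == 'on':
--             width = 8 if i + 4 < n and sql_toks[i + 4] == 'and' else 4
--             spans.append((i, i + width))
--             i += width
--         else:
--             i += 1
--     # stage 2: stitch together the kept slices between the deleted spans
--     out = []
--     prev = 0
--     for start, end in spans:
--         out.extend(sql_toks[prev:start])
--         prev = end
--     out.extend(sql_toks[prev:])
--     return out
-- ===== Notes on version B (the rewrite author's own statement) =====
-- stated objective: alternative
-- what changed: Replaces A's single-pass skip-countdown filter with two staged passes: the first computes the half-open index spans of tokens to delete, the second assembles the output by concatenating the kept slices between those spans.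
import Mathlib
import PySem

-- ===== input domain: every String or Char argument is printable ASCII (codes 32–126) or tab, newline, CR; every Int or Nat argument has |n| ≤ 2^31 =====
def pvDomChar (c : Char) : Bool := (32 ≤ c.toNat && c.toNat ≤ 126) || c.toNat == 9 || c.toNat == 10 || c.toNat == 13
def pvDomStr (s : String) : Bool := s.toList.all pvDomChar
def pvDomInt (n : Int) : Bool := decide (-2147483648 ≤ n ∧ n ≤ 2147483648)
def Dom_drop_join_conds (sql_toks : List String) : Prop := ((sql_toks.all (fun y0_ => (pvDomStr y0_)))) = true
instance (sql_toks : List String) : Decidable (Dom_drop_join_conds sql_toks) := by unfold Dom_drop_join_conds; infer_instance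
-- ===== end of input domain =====

-- B replaces A's one-pass skip-countdown with two staged passes: first compute the half-open spans of tokens to delete, then stitch the kept slices together (alternative decomposition, same O(n) cost).


-- ===== PORT A =====
-- one iteration of A's for-loop body; state = (output_sql, skip)
def dropJoinStepA (sql_toks : List String) (st : List String × Nat) (p : String × Nat) : List String × Nat :=
  if st.2 > 0 then (st.1, st.2 - 1)
  else if p.1 = "on" then
    -- guard 'ti + 4 < len' makes the getD access exact (Python never indexes out of range here)
    if p.2 + 4 < sql_toks.length ∧ sql_toks.getD (p.2 + 4) "" = "and" then (st.1, 7)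
    else (st.1, 3)
  else (st.1 ++ [p.1], st.2)

-- for ti, tok in enumerate(sql_toks): … (List.zipIdx pairs each token with its index)
def drop_join_conds (sql_toks : List String) : List String :=
  (sql_toks.zipIdx.foldl (dropJoinStepA sql_toks) ([], 0)).1

-- ===== PORT B =====
-- stage 1: the while loop collecting the half-open spans [start, start+width) to delete
def dropJoinSpansB (sql_toks : List String) (i : Nat) : List (Nat × Nat) :=
  if i < sql_toks.length then
    if sql_toks.getD i "" = "on" then
      -- width = 8 if the lookahead finds 'and', else 4; span end = i + width, cursor jumps there
      if i + 4 < sql_toks.length ∧ sql_toks.getD (i + 4) "" = "and" then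
        (i, i + 8) :: dropJoinSpansB sql_toks (i + 8)
      else (i, i + 4) :: dropJoinSpansB sql_toks (i + 4)
    else dropJoinSpansB sql_toks (i + 1)
  else []
termination_by sql_toks.length - i

-- stage 2: for start, end in spans: out.extend(sql_toks[prev:start]); prev = end — then out.extend(sql_toks[prev:])
def drop_join_conds_alt (sql_toks : List String) : List String :=
  let spans := dropJoinSpansB sql_toks 0
  let st := spans.foldl
    (fun (st : List String × Nat) (se : Nat × Nat) =>
      (st.1 ++ PySem.List.slice sql_toks (some (st.2 : Int)) (some (se.1 : Int)), se.2))
    ([], 0)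
  st.1 ++ PySem.List.slice sql_toks (some (st.2 : Int)) none

-- ===== PRECONDITION & SPEC =====
def Spec_drop_join_conds (sql_toks : List String) (out : List String) : Prop := out = drop_join_conds_alt sql_toks
instance (sql_toks : List String) (out : List String) : Decidable (Spec_drop_join_conds sql_toks out) := by unfold Spec_drop_join_conds; infer_instance

-- ===== CLAIM (what is proved, stated in full; the proofs are below) =====
def Claim_equal_drop_join_conds : Prop := ∀ (sql_toks : List String), Dom_drop_join_conds sql_toks → Spec_drop_join_conds sql_toks (drop_join_conds sql_toks)

-- ===== LEMMAS AND PROOFS =====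

-- the kept tokens from position i, as a direct recursion (common reference point of both proofs)
def keptFrom (sql_toks : List String) (i : Nat) : List String :=
  if i < sql_toks.length then
    if sql_toks.getD i "" = "on" then
      if i + 4 < sql_toks.length ∧ sql_toks.getD (i + 4) "" = "and" then
        keptFrom sql_toks (i + 8)
      else keptFrom sql_toks (i + 4)
    else sql_toks.getD i "" :: keptFrom sql_toks (i + 1)
  else []
termination_by sql_toks.length - i

-- ---- A-side: the fold with skip = 0 computes keptFrom ----

-- A's loop restarted at position i: fold over the index-tagged suffix
def dropJoinFromA (sql_toks : List String) (i : Nat) (st : List String × Nat) : List String × Nat :=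
  ((sql_toks.drop i).zipIdx i).foldl (dropJoinStepA sql_toks) st

theorem dropJoinFromA_ge (sql_toks : List String) (i : Nat) (st : List String × Nat)
    (h : sql_toks.length ≤ i) : dropJoinFromA sql_toks i st = st := by
  unfold dropJoinFromA
  rw [List.drop_eq_nil_of_le h]
  rfl

theorem dropJoinFromA_lt (sql_toks : List String) (i : Nat) (st : List String × Nat)
    (h : i < sql_toks.length) :
    dropJoinFromA sql_toks i st
      = dropJoinFromA sql_toks (i + 1) (dropJoinStepA sql_toks st (sql_toks[i], i)) := by
  unfold dropJoinFromA
  rw [List.drop_eq_getElem_cons h, List.zipIdx_cons, List.foldl_cons]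

-- positive skip just advances the cursor without output
theorem dropJoinFromA_skip (sql_toks : List String) :
    ∀ (s i : Nat) (acc : List String),
      (dropJoinFromA sql_toks i (acc, s)).1 = (dropJoinFromA sql_toks (i + s) (acc, 0)).1 := by
  intro s
  induction s with
  | zero => intro i acc; rfl
  | succ s ih =>
    intro i acc
    by_cases h : i < sql_toks.length
    · rw [dropJoinFromA_lt sql_toks i _ h]
      have hstep : dropJoinStepA sql_toks (acc, s + 1) (sql_toks[i], i) = (acc, s) := by
        simp [dropJoinStepA]
      rw [hstep, ih (i + 1) acc]
      have : i + 1 + s = i + (s + 1) := by omega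
      rw [this]
    · have h1 : sql_toks.length ≤ i := by omega
      have h2 : sql_toks.length ≤ i + (s + 1) := by omega
      rw [dropJoinFromA_ge sql_toks _ _ h1, dropJoinFromA_ge sql_toks _ _ h2]

-- with skip = 0, A's loop from i appends exactly keptFrom i
theorem dropJoinFromA_eq_kept (sql_toks : List String) :
    ∀ (k i : Nat), sql_toks.length ≤ i + k →
      ∀ (acc : List String),
        (dropJoinFromA sql_toks i (acc, 0)).1 = acc ++ keptFrom sql_toks i := by
  intro k
  induction k with
  | zero =>
    intro i hk acc
    rw [dropJoinFromA_ge sql_toks i _ (by omega), keptFrom,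
        if_neg (by omega : ¬ i < sql_toks.length), List.append_nil]
  | succ k ih =>
    intro i hk acc
    by_cases h : i < sql_toks.length
    · have hg : sql_toks.getD i "" = sql_toks[i] := List.getD_eq_getElem sql_toks "" h
      rw [dropJoinFromA_lt sql_toks i _ h, keptFrom, if_pos h, hg]
      by_cases hon : sql_toks[i] = "on"
      · rw [if_pos hon]
        by_cases hand : i + 4 < sql_toks.length ∧ sql_toks.getD (i + 4) "" = "and"
        · have hstep : dropJoinStepA sql_toks (acc, 0) (sql_toks[i], i) = (acc, 7) := by
            have h4 : sql_toks[i + 4] = "and" := by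
              rw [← List.getD_eq_getElem sql_toks "" hand.1]; exact hand.2
            simp [dropJoinStepA, hon, hand.1, h4]
          rw [hstep, if_pos hand, dropJoinFromA_skip sql_toks 7 (i + 1) acc,
              (by omega : i + 1 + 7 = i + 8), ih (i + 8) (by omega) acc]
        · have hstep : dropJoinStepA sql_toks (acc, 0) (sql_toks[i], i) = (acc, 3) := by
            have hand' := hand
            simp only [List.getD_eq_getElem?_getD] at hand'
            simp [dropJoinStepA, hon]
            intro hlt he
            exact hand' ⟨hlt, he⟩
          rw [hstep, if_neg hand, dropJoinFromA_skip sql_toks 3 (i + 1) acc,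
              (by omega : i + 1 + 3 = i + 4), ih (i + 4) (by omega) acc]
      · have hstep : dropJoinStepA sql_toks (acc, 0) (sql_toks[i], i) = (acc ++ [sql_toks[i]], 0) := by
          simp [dropJoinStepA, hon]
        rw [if_neg hon, hstep, ih (i + 1) (by omega) (acc ++ [sql_toks[i]]),
            List.append_assoc]
        rfl
    · rw [dropJoinFromA_ge sql_toks i _ (by omega), keptFrom, if_neg h, List.append_nil]

-- ---- B-side: the staged passes also compute keptFrom ----

-- the slice-stitching of stage 2, written as a recursion on the span list
def stitch (sql_toks : List String) : List (Nat × Nat) → Nat → List String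
  | [], prev => sql_toks.drop prev
  | (s, e) :: rest, prev => ((sql_toks.drop prev).take (s - prev)) ++ stitch sql_toks rest e

-- stage 2's fold equals stitch
theorem foldB_eq_stitch (sql_toks : List String) :
    ∀ (spans : List (Nat × Nat)) (out : List String) (prev : Nat),
      (let st := spans.foldl
        (fun (st : List String × Nat) (se : Nat × Nat) =>
          (st.1 ++ PySem.List.slice sql_toks (some (st.2 : Int)) (some (se.1 : Int)), se.2))
        (out, prev)
       st.1 ++ PySem.List.slice sql_toks (some (st.2 : Int)) none)
      = out ++ stitch sql_toks spans prev := by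
  intro spans
  induction spans with
  | nil =>
    intro out prev
    simp [stitch, PySem.List.slice_from_natCast]
  | cons se rest ih =>
    intro out prev
    obtain ⟨s, e⟩ := se
    simp only [List.foldl_cons]
    rw [ih (out ++ PySem.List.slice sql_toks (some (prev : Int)) (some (s : Int))) e]
    rw [PySem.List.slice_natCast, stitch, List.append_assoc]

-- stitching the spans computed from i, starting at kept-prefix prev, yields the kept tokens
theorem stitch_spansB (sql_toks : List String) :
    ∀ (k i prev : Nat), prev ≤ i → sql_toks.length ≤ i + k →
      stitch sql_toks (dropJoinSpansB sql_toks i) prev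
        = (sql_toks.drop prev).take (i - prev) ++ keptFrom sql_toks i := by
  intro k
  induction k with
  | zero =>
    intro i prev hpi hk
    rw [dropJoinSpansB, if_neg (by omega : ¬ i < sql_toks.length),
        keptFrom, if_neg (by omega : ¬ i < sql_toks.length), List.append_nil]
    unfold stitch
    rw [List.take_of_length_le (by simp; omega)]
  | succ k ih =>
    intro i prev hpi hk
    rw [dropJoinSpansB, keptFrom]
    by_cases h : i < sql_toks.length
    · rw [if_pos h, if_pos h]
      by_cases hon : sql_toks.getD i "" = "on"
      · rw [if_pos hon, if_pos hon]
        by_cases hand : i + 4 < sql_toks.length ∧ sql_toks.getD (i + 4) "" = "and"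
        · simp only [if_pos hand, stitch]
          rw [ih (i + 8) (i + 8) (le_refl _) (by omega)]
          simp
        · simp only [if_neg hand, stitch]
          rw [ih (i + 4) (i + 4) (le_refl _) (by omega)]
          simp
      · rw [if_neg hon, if_neg hon, ih (i + 1) prev (by omega) (by omega)]
        have htake : (sql_toks.drop prev).take (i + 1 - prev)
            = (sql_toks.drop prev).take (i - prev) ++ [sql_toks.getD i ""] := by
          have hlt : i - prev < (sql_toks.drop prev).length := by simp; omega
          have : i + 1 - prev = (i - prev) + 1 := by omega
          rw [this, List.take_add_one, List.getElem?_eq_getElem hlt]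
          simp [List.getElem_drop, List.getElem?_eq_getElem h,
                (by omega : prev + (i - prev) = i)]
        rw [htake, List.append_assoc]
        rfl
    · rw [if_neg h, if_neg h]
      unfold stitch
      rw [List.take_of_length_le (by simp; omega), List.append_nil]

-- ===== VERDICT (by name: the statement is the Claim_ definition above) =====
theorem drop_join_conds_spec : Claim_equal_drop_join_conds := by
  intro sql_toks _
  unfold Spec_drop_join_conds drop_join_conds drop_join_conds_alt
  have hA : sql_toks.zipIdx = (sql_toks.drop 0).zipIdx 0 := by simp
  rw [hA]
  have hA' := dropJoinFromA_eq_kept sql_toks sql_toks.length 0 (by omega) []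
  unfold dropJoinFromA at hA'
  rw [hA']
  have hB := foldB_eq_stitch sql_toks (dropJoinSpansB sql_toks 0) [] 0
  simp only at hB
  rw [hB, stitch_spansB sql_toks sql_toks.length 0 0 (le_refl _) (by omega)]
  simp
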